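-- pv_equiv track=rewrite | github.com/CianLR/judge-solutions | guessthedatastructure.py | guess_ds
-- ===== SOURCE A (Python) =====
-- from collections import deque
-- import heapq
--
-- class LIFO:
--
--     TYPE = 'stack'
--
--     def __init__(self):
--         self.q = deque()
--
--     def add(self, x):
--         self.q.append(x)
--
--     def pop(self):
--         return self.q.pop() if self.q else None
--
-- class FIFO:
--
--     TYPE = 'queue'
--
--     def __init__(self):
--         self.q = deque()
--
--     def add(self, x):
--         self.q.append(x)
--
--     def pop(self):
--         return self.q.popleft() if self.q else None
--
-- class PQ:
--
--     TYPE = 'priority queue'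
--
--     def __init__(self):
--         self.q = []
--
--     def add(self, x):
--         heapq.heappush(self.q, -x)
--
--     def pop(self):
--         return -heapq.heappop(self.q) if self.q else None
--
-- def guess_ds(N, cmds):
--     ds = [LIFO(), FIFO(), PQ()]
--     for t, x in cmds:
--         for i in range(len(ds) - 1, -1, -1):
--             if t == 1:
--                 ds[i].add(x)
--             else:
--                 if ds[i].pop() != x:
--                     del ds[i]
--     if len(ds) == 0:
--         return 'impossible'
--     elif len(ds) == 1:
--         return ds[0].TYPE
--     return 'not sure'
-- ===== SOURCE B (Python) =====
-- import heapq
--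
-- def _ok_stack(cmds):
--     s = []
--     for t, x in cmds:
--         if t == 1:
--             s.append(x)
--         elif not s or s.pop() != x:
--             return False
--     return True
--
-- def _ok_queue(cmds):
--     q = []
--     i = 0
--     for t, x in cmds:
--         if t == 1:
--             q.append(x)
--         else:
--             if i >= len(q) or q[i] != x:
--                 return False
--             i += 1
--     return True
--
-- def _ok_pq(cmds):
--     h = []
--     for t, x in cmds:
--         if t == 1:
--             heapq.heappush(h, -x)
--         elif not h or -heapq.heappop(h) != x:
--             return False
--     return True
--
-- def guess_ds(N, cmds):
--     names = [name for ok, name in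
--              [(_ok_stack(cmds), 'stack'),
--               (_ok_queue(cmds), 'queue'),
--               (_ok_pq(cmds), 'priority queue')]
--              if ok]
--     if not names:
--         return 'impossible'
--     first, rest = names[0], names[1:]
--     return first if not rest else 'not sure'
-- ===== Notes on version B (the rewrite author's own statement) =====
-- stated objective: alternative
-- what changed: A runs one interleaved pass over the commands, mutating a shrinking list of three candidate structures with lazy backward deletion; B runs three independent per-structure validators (stack list, queue with a read index, max-heap) over the whole command log and combines their verdicts at the end.
import Mathlib
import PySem

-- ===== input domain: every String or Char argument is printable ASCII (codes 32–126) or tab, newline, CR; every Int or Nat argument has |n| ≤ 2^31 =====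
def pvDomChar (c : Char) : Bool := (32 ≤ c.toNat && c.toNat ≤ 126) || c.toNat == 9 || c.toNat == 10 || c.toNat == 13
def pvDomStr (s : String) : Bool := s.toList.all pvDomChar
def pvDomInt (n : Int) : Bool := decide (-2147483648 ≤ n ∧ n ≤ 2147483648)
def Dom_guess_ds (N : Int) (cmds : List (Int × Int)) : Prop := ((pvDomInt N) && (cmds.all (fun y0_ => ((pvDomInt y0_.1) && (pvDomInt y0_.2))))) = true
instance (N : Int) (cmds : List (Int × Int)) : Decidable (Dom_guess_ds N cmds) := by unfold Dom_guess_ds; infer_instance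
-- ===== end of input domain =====

-- B replaces A's single interleaved pass (with lazy deletion of eliminated candidates) by
-- three independent per-structure validators combined at the end ('alternative' objective).

-- ===== PORT A =====
-- model of heapq on Int: the heap list kept sorted ascending (heappush inserts in place,
-- heappop = head); exact for the values heappop returns, which is all A observes of it.
def heapPush (v : Int) : List Int → List Int
  | [] => [v]
  | a :: t => if v ≤ a then v :: a :: t else a :: heapPush v t

-- the three candidate structures of A, tagged by class
inductive DS : Type
  | lifo : List Int → DS
  | fifo : List Int → DS
  | pq : List Int → DS
deriving DecidableEq, Repr

def dsType : DS → String
  | .lifo _ => "stack"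
  | .fifo _ => "queue"
  | .pq _ => "priority queue"

def dsAdd (d : DS) (x : Int) : DS :=
  match d with
  | .lifo q => .lifo (q ++ [x])
  | .fifo q => .fifo (q ++ [x])
  | .pq q => .pq (heapPush (-x) q)

-- pop: (returned value or none if empty, structure afterwards), as in A's pop methods
def dsPop (d : DS) : Option Int × DS :=
  match d with
  | .lifo q => (q.getLast?, .lifo q.dropLast)
  | .fifo q => (q.head?, .fifo q.tail)
  | .pq q => (q.head?.map (fun v => -v), .pq q.tail)

-- A's inner backward loop over ds with 'del ds[i]': adds to every candidate, or pops every
-- candidate and deletes the mismatching ones (backward deletion = order-preserving filter)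
def stepA (ds : List DS) (c : Int × Int) : List DS :=
  if c.1 == 1 then ds.map (fun d => dsAdd d c.2)
  else ds.filterMap (fun d =>
    let p := dsPop d
    if p.1 == some c.2 then some p.2 else none)

def guess_ds (N : Int) (cmds : List (Int × Int)) : String :=
  let ds := cmds.foldl stepA [DS.lifo [], DS.fifo [], DS.pq []]
  match ds with
  | [] => "impossible"
  | [d] => dsType d
  | _ => "not sure"

-- ===== PORT B =====
-- stack validator: replay all commands against a list, pop from the end
def stackRun : List (Int × Int) → List Int → Bool
  | [], _ => true
  | (t, x) :: rest, s =>
    if t == 1 then stackRun rest (s ++ [x])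
    else match s.getLast? with
      | none => false
      | some v => if v == x then stackRun rest s.dropLast else false

-- queue validator: growing list plus a read index, never removes
def queueRun : List (Int × Int) → List Int → Nat → Bool
  | [], _, _ => true
  | (t, x) :: rest, q, i =>
    if t == 1 then queueRun rest (q ++ [x]) i
    else match q[i]? with
      | none => false
      | some v => if v == x then queueRun rest q (i + 1) else false

-- priority-queue validator: max-heap via heapq on negated keys (B's own copy of the
-- sorted-ascending heapq model: heappush inserts in place, heappop = head)
def heapPushB (v : Int) (l : List Int) : List Int :=
  l.takeWhile (fun a => decide (a < v)) ++ v :: l.dropWhile (fun a => decide (a < v))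

def pqRun : List (Int × Int) → List Int → Bool
  | [], _ => true
  | (t, x) :: rest, h =>
    if t == 1 then pqRun rest (heapPushB (-x) h)
    else match h with
      | [] => false
      | a :: h' => if -a == x then pqRun rest h' else false

def guess_ds_alt (N : Int) (cmds : List (Int × Int)) : String :=
  let verdicts : List (Bool × String) :=
    [(stackRun cmds [], "stack"), (queueRun cmds [] 0, "queue"), (pqRun cmds [], "priority queue")]
  let names := (verdicts.filter (fun p => p.1)).map (fun p => p.2)
  match names with
  | [] => "impossible"
  | n :: rest => if rest.isEmpty then n else "not sure"

-- ===== PRECONDITION & SPEC =====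
def Spec_guess_ds (N : Int) (cmds : List (Int × Int)) (out : String) : Prop := out = guess_ds_alt N cmds
instance (N : Int) (cmds : List (Int × Int)) (out : String) : Decidable (Spec_guess_ds N cmds out) := by unfold Spec_guess_ds; infer_instance

-- ===== CLAIM (what is proved, stated in full; the proofs are below) =====
def Claim_equal_guess_ds : Prop := ∀ (N : Int) (cmds : List (Int × Int)), Dom_guess_ds N cmds → Spec_guess_ds N cmds (guess_ds N cmds)

-- ===== LEMMAS AND PROOFS =====

theorem heapPushB_eq (v : Int) (l : List Int) : heapPushB v l = heapPush v l := by
  induction l with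
  | nil => rfl
  | cons a t ih =>
    by_cases h : v ≤ a
    · simp [heapPushB, heapPush, h, not_lt.mpr h]
    · simp only [heapPushB, heapPush, List.takeWhile_cons, List.dropWhile_cons] at *
      simp [h, not_le.mp h, ih]

-- replay of ALL commands against one single candidate, none = eliminated at some pop
def replayOne : List (Int × Int) → DS → Option DS
  | [], d => some d
  | c :: rest, d =>
    if c.1 == 1 then replayOne rest (dsAdd d c.2)
    else
      let p := dsPop d
      if p.1 == some c.2 then replayOne rest p.2 else none

theorem foldl_stepA (cmds : List (Int × Int)) (L : List DS) :
    cmds.foldl stepA L = L.filterMap (fun d => replayOne cmds d) := by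
  induction cmds generalizing L with
  | nil => simp [replayOne]
  | cons c rest ih =>
    rw [List.foldl_cons, ih]
    by_cases h : c.1 == 1
    · simp only [stepA]
      rw [if_pos (by simpa using h), List.filterMap_map]
      apply List.filterMap_congr
      intro d _
      simp [replayOne, h]
    · simp only [stepA]
      rw [if_neg (by simpa using h), List.filterMap_filterMap]
      apply List.filterMap_congr
      intro d _
      have hr : replayOne (c :: rest) d =
          if (dsPop d).1 == some c.2 then replayOne rest (dsPop d).2 else none := by
        simp [replayOne, h]
      rw [hr]
      cases hp : ((dsPop d).1 == some c.2) <;> simp [hp]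

theorem replay_lifo (cmds : List (Int × Int)) (s : List Int) :
    (replayOne cmds (.lifo s)).isSome = stackRun cmds s ∧
    (∀ d, replayOne cmds (.lifo s) = some d → dsType d = "stack") := by
  induction cmds generalizing s with
  | nil => simp [replayOne, stackRun, dsType]
  | cons c rest ih =>
    obtain ⟨t, x⟩ := c
    by_cases h : t == 1
    · simpa [replayOne, stackRun, h, dsAdd] using ih (s ++ [x])
    · cases hl : s.getLast? with
      | none => simp [replayOne, stackRun, h, dsPop, hl]
      | some v =>
        by_cases hv : v == x
        · have := beq_iff_eq.mp hv
          subst this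
          simpa [replayOne, stackRun, h, dsPop, hl, hv] using ih s.dropLast
        · simp [replayOne, stackRun, h, dsPop, hl, hv]

theorem replay_fifo (cmds : List (Int × Int)) (q : List Int) (i : Nat) (hle : i ≤ q.length) :
    (replayOne cmds (.fifo (q.drop i))).isSome = queueRun cmds q i ∧
    (∀ d, replayOne cmds (.fifo (q.drop i)) = some d → dsType d = "queue") := by
  induction cmds generalizing q i with
  | nil => simp [replayOne, queueRun, dsType]
  | cons c rest ih =>
    obtain ⟨t, x⟩ := c
    by_cases h : t == 1
    · have hd : (q ++ [x]).drop i = q.drop i ++ [x] := List.drop_append_of_le_length hle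
      have hle' : i ≤ (q ++ [x]).length := by simp; omega
      have := ih (q ++ [x]) i hle'
      rw [hd] at this
      simpa [replayOne, queueRun, h, dsAdd] using this
    · have hh : (q.drop i).head? = q[i]? := List.head?_drop
      cases hg : q[i]? with
      | none => simp [replayOne, queueRun, h, dsPop, hh, hg]
      | some v =>
        by_cases hv : v == x
        · have := beq_iff_eq.mp hv
          subst this
          have hlt : i < q.length := by
            by_contra hc
            rw [List.getElem?_eq_none (by omega)] at hg
            simp at hg
          have ht : (q.drop i).tail = q.drop (i + 1) := by
            rw [List.tail_drop]
          have := ih q (i + 1) (by omega)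
          rw [← ht] at this
          simpa [replayOne, queueRun, h, dsPop, hh, hg, hv] using this
        · simp [replayOne, queueRun, h, dsPop, hh, hg, hv]

theorem replay_pq (cmds : List (Int × Int)) (hp : List Int) :
    (replayOne cmds (.pq hp)).isSome = pqRun cmds hp ∧
    (∀ d, replayOne cmds (.pq hp) = some d → dsType d = "priority queue") := by
  induction cmds generalizing hp with
  | nil => simp [replayOne, pqRun, dsType]
  | cons c rest ih =>
    obtain ⟨t, x⟩ := c
    by_cases h : t == 1
    · have hb : heapPushB (-x) hp = heapPush (-x) hp := heapPushB_eq (-x) hp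
      simpa [replayOne, pqRun, h, dsAdd, hb] using ih (heapPush (-x) hp)
    · cases hp with
      | nil => simp [replayOne, pqRun, h, dsPop]
      | cons a h' =>
        by_cases hv : -a == x
        · have := beq_iff_eq.mp hv
          simpa [replayOne, pqRun, h, dsPop, hv, this] using ih h'
        · simp [replayOne, pqRun, h, dsPop, hv]

-- ===== VERDICT (by name: the statement is the Claim_ definition above) =====
theorem guess_ds_spec : Claim_equal_guess_ds := by
  intro N cmds _
  unfold Spec_guess_ds guess_ds guess_ds_alt
  rw [foldl_stepA]
  obtain ⟨e1, t1⟩ := replay_lifo cmds []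
  obtain ⟨e2, t2⟩ := replay_fifo cmds [] 0 (by simp)
  obtain ⟨e3, t3⟩ := replay_pq cmds []
  simp only [List.drop_nil] at e2 t2
  cases o1 : replayOne cmds (.lifo []) <;>
    cases o2 : replayOne cmds (.fifo []) <;>
      cases o3 : replayOne cmds (.pq []) <;>
        rw [o1] at e1 t1 <;> rw [o2] at e2 t2 <;> rw [o3] at e3 t3 <;>
          simp only [List.filterMap_cons, List.filterMap_nil, o1, o2, o3, ← e1, ← e2, ← e3,
            Option.isSome_some, Option.isSome_none, List.filter, List.map] <;>
            simp_all [dsType]
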